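-- pv_equiv track=rewrite | github.com/ASauler/soulx-tts-metal | app.py | generate_display_name
-- ===== SOURCE A (Python) =====
-- def generate_display_name(speaker_id):
--     """
--     根据文件名生成友好的显示名称
--
--     规则:
--     - female_1 -> 女声1
--     - male_1 -> 男声1
--     - female_sweet -> 女声sweet
--     - custom_name -> custom_name (保持原样)
--     """
--     # 映射表
--     prefix_map = {
--         'female': '女声',
--         'male': '男声',
--         'neutral': '中性',
--         'child': '童声',
--     }
--
--     # 尝试匹配前缀
--     for eng_prefix, cn_prefix in prefix_map.items():
--         if speaker_id.startswith(eng_prefix + '_'):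
--             suffix = speaker_id[len(eng_prefix) + 1:]
--             return f"{cn_prefix}{suffix}"
--
--     # 如果没有匹配，返回原始 ID
--     return speaker_id
-- ===== SOURCE B (Python) =====
-- def generate_display_name(speaker_id):
--     """Friendly display name: translate a known English prefix before the first underscore."""
--     prefix_map = {
--         'female': '女声',
--         'male': '男声',
--         'neutral': '中性',
--         'child': '童声',
--     }
--     i = speaker_id.find('_')
--     if i != -1:
--         cn = prefix_map.get(speaker_id[:i])
--         if cn is not None:
--             return cn + speaker_id[i + 1:]
--     return speaker_id
-- ===== Notes on version B (the rewrite author's own statement) =====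
-- stated objective: simpler
-- what changed: Instead of scanning the prefix table and testing startswith(prefix plus separator) for each entry, B locates the first underscore once with str.find and resolves the head before it by a single dict lookup.
import Mathlib
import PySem

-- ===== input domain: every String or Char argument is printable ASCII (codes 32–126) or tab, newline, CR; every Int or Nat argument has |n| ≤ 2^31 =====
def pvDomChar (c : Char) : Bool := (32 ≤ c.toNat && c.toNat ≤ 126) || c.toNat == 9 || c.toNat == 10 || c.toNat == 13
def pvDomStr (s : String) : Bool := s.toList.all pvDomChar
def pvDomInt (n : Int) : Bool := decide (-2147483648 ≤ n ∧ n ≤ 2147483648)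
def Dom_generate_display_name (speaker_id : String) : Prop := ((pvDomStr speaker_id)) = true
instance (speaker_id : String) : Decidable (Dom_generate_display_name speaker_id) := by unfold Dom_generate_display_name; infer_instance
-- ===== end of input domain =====

-- B replaces A's scan over the prefix table (one startswith test per entry) by a single str.find of the separator plus a direct dict lookup of the head; objective: simpler.

-- ===== PORT A =====
-- the for-loop over prefix_map.items with early return
def pvLoopA : List (String × String) → String → Option String
  | [], _ => none
  | (eng_prefix, cn_prefix) :: rest, speaker_id =>
    if PySem.Str.startswith speaker_id (eng_prefix ++ "_") then
      some (cn_prefix ++ PySem.Str.slice speaker_id (some ((PySem.Str.len eng_prefix : Int) + 1)) none)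
    else pvLoopA rest speaker_id

def generate_display_name (speaker_id : String) : String :=
  let prefix_map : PySem.Dict String String :=
    PySem.Dict.ofList [("female", "女声"), ("male", "男声"), ("neutral", "中性"), ("child", "童声")]
  match pvLoopA prefix_map.items speaker_id with
  | some r => r
  | none => speaker_id

-- ===== PORT B =====
-- Source B: find the first separator; if present, look the head up in prefix_map and, on a hit, return its value plus the tail; otherwise return speaker_id
def generate_display_name_alt (speaker_id : String) : String :=
  let prefix_map : PySem.Dict String String :=
    PySem.Dict.ofList [("female", "女声"), ("male", "男声"), ("neutral", "中性"), ("child", "童声")]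
  let i : Int := PySem.Str.find speaker_id "_"
  if i ≠ -1 then
    match prefix_map.get? (PySem.Str.slice speaker_id none (some i)) with
    | some cn => cn ++ PySem.Str.slice speaker_id (some (i + 1)) none
    | none => speaker_id
  else speaker_id


-- ===== PRECONDITION & SPEC =====
def Spec_generate_display_name (speaker_id : String) (out : String) : Prop := out = generate_display_name_alt speaker_id
instance (speaker_id : String) (out : String) : Decidable (Spec_generate_display_name speaker_id out) := by unfold Spec_generate_display_name; infer_instance

-- ===== CLAIM (what is proved, stated in full; the proofs are below) =====
def Claim_equal_generate_display_name : Prop := ∀ (speaker_id : String), Dom_generate_display_name speaker_id → Spec_generate_display_name speaker_id (generate_display_name speaker_id)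

-- ===== LEMMAS AND PROOFS =====
lemma pv_find_spec (cs : List Char) (n : ℕ) (h : PySem.Chars.find cs ['_'] = (n : Int)) :
    ['_'] <+: cs.drop n ∧ ∀ i, i < n → ¬ ['_'] <+: cs.drop i := by
  have hne : PySem.Chars.findFrom cs ['_'] ((0:ℕ):Int) none ≠ -1 := by
    norm_cast; rw [PySem.Chars.findFrom_zero, h]; omega
  have hs := PySem.Chars.findFrom_natCast_spec cs ['_'] 0 (by omega) hne
  norm_cast at hs
  rw [PySem.Chars.findFrom_zero, h] at hs
  simp only [Int.toNat_natCast] at hs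
  exact ⟨hs.2.1, fun i hi => hs.2.2 i (by omega) hi⟩

lemma pv_key_prefix_iff (cs k : List Char) (hk : '_' ∉ k) (n : ℕ)
    (hdrop : ['_'] <+: cs.drop n) (hmin : ∀ i, i < n → ¬ ['_'] <+: cs.drop i) :
    ((k ++ ['_']) <+: cs ↔ cs.take n = k) := by
  obtain ⟨t, ht⟩ := hdrop
  have hlen : n < cs.length := by
    by_contra hge
    have : cs.drop n = [] := List.drop_eq_nil_of_le (by omega)
    rw [this] at ht; simp at ht
  constructor
  · rintro ⟨r, hr⟩
    have hnk : n = k.length := by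
      by_contra hne
      rcases Nat.lt_or_ge n k.length with hlt | hge
      · -- cs.drop n head is k[n] ≠ '_'
        have : cs.drop n = k.drop n ++ ('_' :: r) := by
          rw [← hr, List.append_assoc, List.drop_append_of_le_length (by omega)]
          rfl
        rw [this] at ht
        have hk' : k.drop n ≠ [] := by simp [List.drop_eq_nil_iff]; omega
        obtain ⟨a, ks, hks⟩ := List.exists_cons_of_ne_nil hk'
        rw [hks] at ht
        simp at ht
        have ha : a ∈ List.drop n k := by rw [hks]; simp
        have : a ∈ k := List.mem_of_mem_drop ha
        rw [← ht.1] at this; exact hk this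
      · have hlt2 : k.length < n := by omega
        apply hmin k.length hlt2
        refine ⟨r, ?_⟩
        rw [← hr, List.append_assoc, List.drop_append_of_le_length le_rfl]
        simp
    subst hnk
    have : cs.take k.length = k := by
      rw [← hr, List.append_assoc, List.take_append_of_le_length le_rfl]
      simp
    exact this
  · intro htake
    have hcs : cs = k ++ '_' :: t := by
      conv_lhs => rw [← List.take_append_drop n cs, htake, ← ht]
      rfl
    exact ⟨t, by rw [hcs]; simp⟩

lemma pv_find_chars (s : String) (v : Int) (h : PySem.Str.find s "_" = v) :
    PySem.Chars.find s.toList ['_'] = v := by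
  simpa using h

lemma pv_nosub (s : String) (h : PySem.Str.find s "_" = -1) (k : String) :
    PySem.Str.startswith s (k ++ "_") = false := by
  have hc : PySem.Chars.find s.toList ['_'] = -1 := pv_find_chars s _ h
  have hni : ¬ ['_'] <:+: s.toList := (PySem.Chars.find_eq_neg_one_iff _ _).mp hc
  rw [Bool.eq_false_iff]
  intro htrue
  rw [PySem.Str.startswith_eq, PySem.Chars.startswith_iff] at htrue
  have h2 : (k ++ "_").toList = k.toList ++ ['_'] := by simp
  rw [h2] at htrue
  exact hni (((List.suffix_append k.toList ['_']).isInfix).trans htrue.isInfix)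

lemma pv_head_eq (s k : String) (n : ℕ)
    (hb : (k == PySem.Str.slice s none (some ((n : ℕ) : Int))) = true) :
    k.toList = s.toList.take n := by
  have : k = PySem.Str.slice s none (some ((n : ℕ) : Int)) := beq_iff_eq.mp hb
  rw [this]
  simp [PySem.Str.toList_slice, PySem.Chars.slice_eq_listSlice, PySem.List.slice_to_natCast]

lemma pv_cond (s k : String) (hk : '_' ∉ k.toList) (n : ℕ)
    (hf : PySem.Str.find s "_" = ((n : ℕ) : Int)) :
    PySem.Str.startswith s (k ++ "_") = (k == PySem.Str.slice s none (some ((n : ℕ) : Int))) := by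
  have hc : PySem.Chars.find s.toList ['_'] = (n : Int) := pv_find_chars s _ hf
  obtain ⟨hdrop, hmin⟩ := pv_find_spec s.toList n hc
  rw [Bool.eq_iff_iff]
  constructor
  · intro htrue
    rw [PySem.Str.startswith_eq, PySem.Chars.startswith_iff] at htrue
    have h2 : (k ++ "_").toList = k.toList ++ ['_'] := by simp
    rw [h2] at htrue
    have htake := (pv_key_prefix_iff s.toList k.toList hk n hdrop hmin).mp htrue
    rw [beq_iff_eq]
    apply String.toList_inj.mp
    rw [htake.symm]
    simp [PySem.Str.toList_slice, PySem.Chars.slice_eq_listSlice, PySem.List.slice_to_natCast]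
  · intro hb
    have htake := pv_head_eq s k n hb
    rw [PySem.Str.startswith_eq, PySem.Chars.startswith_iff]
    have h2 : (k ++ "_").toList = k.toList ++ ['_'] := by simp
    rw [h2]
    exact (pv_key_prefix_iff s.toList k.toList hk n hdrop hmin).mpr htake.symm

lemma pv_slice_eq (s k : String) (n : ℕ)
    (hf : PySem.Str.find s "_" = ((n : ℕ) : Int))
    (hb : (k == PySem.Str.slice s none (some ((n : ℕ) : Int))) = true) :
    PySem.Str.slice s (some ((PySem.Str.len k : Int) + 1)) none
      = PySem.Str.slice s (some (((n : ℕ) : Int) + 1)) none := by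
  have hc : PySem.Chars.find s.toList ['_'] = (n : Int) := pv_find_chars s _ hf
  obtain ⟨hdrop, hmin⟩ := pv_find_spec s.toList n hc
  have hlen : n < s.toList.length := by
    by_contra hge
    have : s.toList.drop n = [] := List.drop_eq_nil_of_le (by omega)
    rw [this] at hdrop
    simp at hdrop
  have htake := pv_head_eq s k n hb
  have hlk : PySem.Str.len k = n := by
    have h3 : k.toList.length = n := by
      rw [htake, List.length_take]; omega
    simpa using h3
  rw [hlk]


-- ===== VERDICT (by name: the statement is the Claim_ definition above) =====
theorem generate_display_name_spec : Claim_equal_generate_display_name := by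
  intro s _
  unfold Spec_generate_display_name
  show generate_display_name s = generate_display_name_alt s

  have hmk : (PySem.Dict.ofList [("female", "女声"), ("male", "男声"), ("neutral", "中性"), ("child", "童声")] : PySem.Dict String String)
      = PySem.Dict.mk [("female", "女声"), ("male", "男声"), ("neutral", "中性"), ("child", "童声")] := by decide
  by_cases hneg : PySem.Str.find s "_" = -1
  · simp only [generate_display_name, generate_display_name_alt, hmk, pvLoopA, hneg,
      pv_nosub s hneg]
    simp
  · obtain ⟨n, hn⟩ : ∃ n : ℕ, PySem.Str.find s "_" = ((n : ℕ) : Int) := by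
      have hge : -1 ≤ PySem.Str.find s "_" := by
        simpa using PySem.Chars.neg_one_le_find s.toList "_".toList
      refine ⟨(PySem.Str.find s "_").toNat, ?_⟩
      omega
    simp only [generate_display_name, generate_display_name_alt, hmk, pvLoopA, hn,
      pv_cond s "female" (by decide) n hn, pv_cond s "male" (by decide) n hn,
      pv_cond s "neutral" (by decide) n hn, pv_cond s "child" (by decide) n hn]
    rw [if_pos (by omega : ((n : ℕ) : Int) ≠ -1)]
    simp only [PySem.Dict.get?_mk_cons]
    by_cases h1 : ("female" == PySem.Str.slice s none (some ((n : ℕ) : Int))) = true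
    · simp only [h1, if_true]
      rw [pv_slice_eq s "female" n hn h1]
    · by_cases h2 : ("male" == PySem.Str.slice s none (some ((n : ℕ) : Int))) = true
      · simp only [h1, h2, if_true, if_false, Bool.false_eq_true]
        rw [pv_slice_eq s "male" n hn h2]
      · by_cases h3 : ("neutral" == PySem.Str.slice s none (some ((n : ℕ) : Int))) = true
        · simp only [h1, h2, h3, if_true, if_false, Bool.false_eq_true]
          rw [pv_slice_eq s "neutral" n hn h3]
        · by_cases h4 : ("child" == PySem.Str.slice s none (some ((n : ℕ) : Int))) = true
          · simp only [h1, h2, h3, h4, if_true, if_false, Bool.false_eq_true]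
            rw [pv_slice_eq s "child" n hn h4]
          · simp only [h1, h2, h3, h4, Bool.false_eq_true, if_false]
            simp [PySem.Dict.get?]
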